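-- pv_equiv track=rewrite | github.com/rc/time_tensors | analyze.py | sparsify_n_cell
-- ===== SOURCE A (Python) =====
-- def sparsify_n_cell(nc):
--     nnc = []
--     last = None
--     for ic in nc:
--         if ic != last:
--             nnc.append('{:,}'.format(ic))
--             last = ic
--
--         else:
--             nnc.append('')
--
--     return nnc
-- ===== SOURCE B (Python) =====
-- def sparsify_n_cell(nc):
--     nnc = []
--     i, n = 0, len(nc)
--     while i < n:
--         j = i + 1
--         while j < n and nc[j] == nc[i]:
--             j += 1
--         nnc.append('{:,}'.format(nc[i]))
--         nnc.extend([''] * (j - i - 1))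
--         i = j
--     return nnc
-- ===== Notes on version B (the rewrite author's own statement) =====
-- stated objective: alternative
-- what changed: Run-based two-pointer rewrite: B scans each maximal run of consecutive equal values at once, emitting the formatted value then a block of empties, instead of A's element-by-element compare-to-last loop.
import Mathlib
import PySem

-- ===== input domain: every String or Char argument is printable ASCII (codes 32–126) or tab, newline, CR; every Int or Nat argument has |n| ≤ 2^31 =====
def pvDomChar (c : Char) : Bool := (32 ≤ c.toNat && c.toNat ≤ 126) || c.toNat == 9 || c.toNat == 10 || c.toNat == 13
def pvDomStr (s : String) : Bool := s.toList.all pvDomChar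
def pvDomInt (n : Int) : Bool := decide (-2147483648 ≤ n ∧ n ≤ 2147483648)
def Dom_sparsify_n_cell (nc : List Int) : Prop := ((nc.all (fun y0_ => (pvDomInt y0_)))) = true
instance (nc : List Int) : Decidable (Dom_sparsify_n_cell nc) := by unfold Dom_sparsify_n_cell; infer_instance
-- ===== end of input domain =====

-- B is a run-based two-pointer rewrite of A's compare-to-last loop: same values, different traversal (alternative).

-- ===== PORT A =====
-- '{:,}'.format(ic): decimal digits grouped in threes by ',' from the right, '-' prefix for negatives.
-- shared by both ports (both Pythons call '{:,}'.format).
def pvCommasRev : List Char → List Char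
  | a :: b :: c :: d :: rest => a :: b :: c :: ',' :: pvCommasRev (d :: rest)
  | l => l

def pvFmtComma (n : Int) : String :=
  let body := (pvCommasRev (PySem.Int.toChars (n.natAbs : Int)).reverse).reverse
  String.ofList (if n < 0 then '-' :: body else body)

-- A's loop: walk the list keeping `last : Option Int` (None initially), emit formatted value or ''.
def sparsifyA_loop (last : Option Int) : List Int → List String
  | [] => []
  | ic :: rest =>
    if some ic ≠ last then pvFmtComma ic :: sparsifyA_loop (some ic) rest
    else "" :: sparsifyA_loop last rest

def sparsify_n_cell (nc : List Int) : List String := sparsifyA_loop none nc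

-- ===== PORT B =====
-- inner while loop of Source B: length of the run of elements equal to v at the front of the rest
def pvRunLen (v : Int) : List Int → Nat
  | [] => 0
  | x :: xs => if x = v then pvRunLen v xs + 1 else 0

def sparsify_n_cell_alt (nc : List Int) : List String :=
  match nc with
  | [] => []
  | x :: xs =>
    let k := pvRunLen x xs
    pvFmtComma x :: (List.replicate k "" ++ sparsify_n_cell_alt (xs.drop k))
termination_by nc.length
decreasing_by simp

-- ===== PRECONDITION & SPEC =====
def Spec_sparsify_n_cell (nc : List Int) (out : List String) : Prop := out = sparsify_n_cell_alt nc
instance (nc : List Int) (out : List String) : Decidable (Spec_sparsify_n_cell nc out) := by unfold Spec_sparsify_n_cell; infer_instance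

-- ===== CLAIM (what is proved, stated in full; the proofs are below) =====
def Claim_equal_sparsify_n_cell : Prop := ∀ (nc : List Int), Dom_sparsify_n_cell nc → Spec_sparsify_n_cell nc (sparsify_n_cell nc)

-- ===== LEMMAS AND PROOFS =====

theorem sparsify_main : ∀ (n : Nat) (nc : List Int), nc.length ≤ n →
    ∀ (last : Option Int), (∀ x, nc.head? = some x → last ≠ some x) →
    sparsifyA_loop last nc = sparsify_n_cell_alt nc := by
  intro n
  induction n with
  | zero =>
    intro nc hlen _ _
    cases nc with
    | nil => simp [sparsifyA_loop, sparsify_n_cell_alt]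
    | cons x xs => simp at hlen
  | succ n ih =>
    intro nc hlen last hne
    cases nc with
    | nil => simp [sparsifyA_loop, sparsify_n_cell_alt]
    | cons x xs =>
      have hx : last ≠ some x := hne x (by simp)
      have hxs : xs.length ≤ n := by simp at hlen; omega
      have hA : sparsifyA_loop last (x :: xs) = pvFmtComma x :: sparsifyA_loop (some x) xs := by
        simp only [sparsifyA_loop]
        rw [if_pos (show some x ≠ last from fun h => hx (Eq.symm h))]
      have hB : sparsify_n_cell_alt (x :: xs) =
          pvFmtComma x :: (List.replicate (pvRunLen x xs) "" ++ sparsify_n_cell_alt (xs.drop (pvRunLen x xs))) := by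
        rw [sparsify_n_cell_alt.eq_def]
      rw [hA, hB]
      congr 1
      -- after emitting x, the remainder of the run of x gives '' entries
      have aux : ∀ (ys : List Int), ys.length ≤ n →
          sparsifyA_loop (some x) ys =
            List.replicate (pvRunLen x ys) "" ++ sparsify_n_cell_alt (ys.drop (pvRunLen x ys)) := by
        intro ys
        induction ys with
        | nil => intro _; simp [sparsifyA_loop, sparsify_n_cell_alt, pvRunLen]
        | cons y ys ihy =>
          intro hlen'
          by_cases hyx : y = x
          · subst hyx
            have h1 : sparsifyA_loop (some y) (y :: ys) = "" :: sparsifyA_loop (some y) ys := by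
              simp [sparsifyA_loop]
            have h2 : pvRunLen y (y :: ys) = pvRunLen y ys + 1 := by simp [pvRunLen]
            rw [h1, h2, ihy (by simp at hlen'; omega), List.replicate_succ]
            simp
          · have h0 : pvRunLen x (y :: ys) = 0 := by simp [pvRunLen, hyx]
            rw [h0]
            simp only [List.replicate_zero, List.nil_append, List.drop_zero]
            exact ih (y :: ys) hlen' (some x) (fun z hz hc => by simp at hz; subst hz; simp_all)
      exact aux xs hxs

-- ===== VERDICT (by name: the statement is the Claim_ definition above) =====
theorem sparsify_n_cell_spec : Claim_equal_sparsify_n_cell := by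
  intro nc _
  unfold Spec_sparsify_n_cell sparsify_n_cell
  exact sparsify_main nc.length nc le_rfl none (by intro x _ h; cases h)
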